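-- pv_equiv track=rewrite | github.com/paudelsagar/agentica | agentica/server.py | filter_agent_content
-- ===== SOURCE A (Python) =====
-- def filter_agent_content(content: str) -> str:
--     """
--     Filter agent content to extract only the human-readable summary.
--     Handles multiple formats:
--     - "SUMMARY: text [END_SUMMARY] PLAN:..." -> extracts "text"
--     - "I'll check... [END_SUMMARY] PLAN:..." -> extracts "I'll check..."
--     - "text PLAN: ..." -> extracts "text"
--     """
--     filtered = content
--
--     # First check if SUMMARY: prefix exists and extract content after it
--     summary_upper = filtered.upper()
--     if "SUMMARY:" in summary_upper:
--         idx = summary_upper.find("SUMMARY:")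
--         filtered = filtered[idx + 8 :]  # 8 = len("SUMMARY:")
--
--     # Find the earliest technical marker and cut there
--     # These markers indicate the start of non-user-facing content
--     markers = ["[END_SUMMARY]", "PLAN:", "NEXT AGENT:", "DELEGATION:", "```tool_code"]
--     end_idx = len(filtered)
--     for marker in markers:
--         idx = (
--             filtered.upper().find(marker.upper())
--             if marker != "```tool_code"
--             else filtered.find(marker)
--         )
--         if idx != -1:
--             end_idx = min(end_idx, idx)
--
--     return filtered[:end_idx].strip()
-- ===== SOURCE B (Python) =====
-- import re
--
-- _SUMMARY_RE = re.compile(r"summary:", re.IGNORECASE)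
--
-- # One alternation of all cut markers: the four case-insensitive ones inside a
-- # scoped (?i:...) group, ```tool_code case-sensitive outside it.
-- _CUT_RE = re.compile(
--     r"(?i:" + "|".join(re.escape(m) for m in
--                        ["[END_SUMMARY]", "PLAN:", "NEXT AGENT:", "DELEGATION:"])
--     + r")|" + re.escape("```tool_code")
-- )
--
--
-- def filter_agent_content(content: str) -> str:
--     m = _SUMMARY_RE.search(content)
--     filtered = content[m.end():] if m else content
--     cut = _CUT_RE.search(filtered)
--     return filtered[:cut.start() if cut else len(filtered)].strip()
-- ===== Notes on version B (the rewrite author's own statement) =====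
-- stated objective: idiomatic
-- what changed: A's per-marker upper().find passes with a running min (and a manual SUMMARY-prefix check via upper) are replaced by two compiled regex searches: a case-insensitive search for the SUMMARY prefix and one alternation of the five cut markers (the four case-insensitive ones in a scoped (?i:) group, the code-fence marker case-sensitive), taking the leftmost match as the cut point.
import Mathlib
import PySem

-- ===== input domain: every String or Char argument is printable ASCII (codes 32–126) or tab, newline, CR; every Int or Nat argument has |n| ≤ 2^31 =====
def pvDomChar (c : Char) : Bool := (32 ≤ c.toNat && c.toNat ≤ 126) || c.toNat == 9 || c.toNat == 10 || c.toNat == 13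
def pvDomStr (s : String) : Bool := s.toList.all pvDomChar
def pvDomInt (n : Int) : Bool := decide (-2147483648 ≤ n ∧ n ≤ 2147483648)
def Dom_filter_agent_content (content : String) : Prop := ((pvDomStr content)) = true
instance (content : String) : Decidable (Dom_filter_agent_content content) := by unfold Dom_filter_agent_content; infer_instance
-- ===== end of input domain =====

-- B replaces A's per-marker upper().find + running min with a single-regex leftmost search
-- (ported by hand as one left-to-right scan); objective: idiomatic single-pass re-implementation.

-- ===== PORT A =====
def pyMarkers : List String := ["[END_SUMMARY]", "PLAN:", "NEXT AGENT:", "DELEGATION:", "```tool_code"]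

def filter_agent_content (content : String) : String :=
  let filtered := content
  let summary_upper := PySem.Str.upper filtered
  let filtered :=
    if PySem.Str.isIn "SUMMARY:" summary_upper then
      let idx := PySem.Str.find summary_upper "SUMMARY:"
      PySem.Str.slice filtered (some (idx + 8)) none
    else filtered
  let end_idx := pyMarkers.foldl
    (fun end_idx marker =>
      let idx := if marker ≠ "```tool_code"
        then PySem.Str.find (PySem.Str.upper filtered) (PySem.Str.upper marker)
        else PySem.Str.find filtered marker
      if idx ≠ -1 then min end_idx idx else end_idx)
    (PySem.Str.len filtered)
  PySem.Str.strip (PySem.Str.slice filtered none (some end_idx))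

-- ===== PORT B =====
-- Source B uses re.search; ported by hand as a leftmost-match scan (re.search returns the
-- earliest position where some alternative matches). (?i:) matching is compared by
-- case-folding both sides with upperChar — exact on the ASCII domain.
-- A pattern is (chars, caseInsensitive?).
def pvMatchesAt (l : List Char) (p : List Char × Bool) : Bool :=
  if p.2 then (PySem.Chars.upper p.1).isPrefixOf (PySem.Chars.upper l)
  else p.1.isPrefixOf l

def pvFirstMatch (ps : List (List Char × Bool)) : List Char → Option Nat
  | [] => if ps.any (pvMatchesAt []) then some 0 else none
  | c :: rest =>
      if ps.any (pvMatchesAt (c :: rest)) then some 0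
      else (pvFirstMatch ps rest).map (· + 1)

def pvSummaryPat : List (List Char × Bool) := [("summary:".toList, true)]

def pvCutPat : List (List Char × Bool) :=
  [("[END_SUMMARY]".toList, true), ("PLAN:".toList, true), ("NEXT AGENT:".toList, true),
   ("DELEGATION:".toList, true), ("```tool_code".toList, false)]

def filter_agent_content_alt (content : String) : String :=
  let cs := content.toList
  let filtered :=
    match pvFirstMatch pvSummaryPat cs with
    | some j => cs.drop (j + 8)   -- m.end() = match start + len("summary:")
    | none => cs
  let e := (pvFirstMatch pvCutPat filtered).getD filtered.length
  String.ofList (PySem.Chars.strip (filtered.take e))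

-- ===== PRECONDITION & SPEC =====
def Spec_filter_agent_content (content : String) (out : String) : Prop := out = filter_agent_content_alt content
instance (content : String) (out : String) : Decidable (Spec_filter_agent_content content out) := by unfold Spec_filter_agent_content; infer_instance

-- ===== CLAIM (what is proved, stated in full; the proofs are below) =====
def Claim_equal_filter_agent_content : Prop := ∀ (content : String), Dom_filter_agent_content content → Spec_filter_agent_content content (filter_agent_content content)

-- ===== LEMMAS AND PROOFS =====

-- Python's find for one pattern, at the list level, with the ci flag of B's patterns.
def pvFindOf (p : List Char × Bool) (l : List Char) : Int :=
  if p.2 then PySem.Chars.find (PySem.Chars.upper l) (PySem.Chars.upper p.1)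
  else PySem.Chars.find l p.1

theorem pvMatchesAt_drop (p : List Char × Bool) (l : List Char) (i : Nat) :
    pvMatchesAt (l.drop i) p = true ↔
      (if p.2 then PySem.Chars.upper p.1 <+: (PySem.Chars.upper l).drop i
       else p.1 <+: l.drop i) := by
  unfold pvMatchesAt
  rcases p with ⟨pat, ci⟩
  cases ci <;> simp [PySem.Chars.upper, List.map_drop, List.isPrefixOf_iff_prefix]

theorem pvFindOf_ge (p : List Char × Bool) (l : List Char) : -1 ≤ pvFindOf p l := by
  unfold pvFindOf; split <;> exact PySem.Chars.neg_one_le_find _ _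

theorem pvFindOf_le (p : List Char × Bool) (l : List Char) : pvFindOf p l ≤ l.length := by
  unfold pvFindOf; split
  · have := PySem.Chars.find_le_length (PySem.Chars.upper l) (PySem.Chars.upper p.1)
    simpa [PySem.Chars.upper] using this
  · exact PySem.Chars.find_le_length _ _

theorem pvFindOf_neg_one (p : List Char × Bool) (l : List Char)
    (h : pvFindOf p l = -1) : ∀ i, pvMatchesAt (l.drop i) p = false := by
  intro i
  rw [← Bool.not_eq_true, pvMatchesAt_drop]
  rcases p with ⟨pat, ci⟩
  cases ci
  · have h' : PySem.Chars.find l pat = -1 := by simpa [pvFindOf] using h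
    simp only [Bool.false_eq_true, if_false]
    intro hp
    exact ((PySem.Chars.find_ne_neg_one_iff l pat).mpr
      ((PySem.Chars.isIn_iff_infix pat l).mp
        ((PySem.Chars.exists_prefix_drop_iff_isIn pat l).mp ⟨i, hp⟩))) h'
  · have h' : PySem.Chars.find (PySem.Chars.upper l) (PySem.Chars.upper pat) = -1 := by
      simpa [pvFindOf] using h
    simp only [if_true]
    intro hp
    exact ((PySem.Chars.find_ne_neg_one_iff _ _).mpr
      ((PySem.Chars.isIn_iff_infix _ _).mp
        ((PySem.Chars.exists_prefix_drop_iff_isIn _ _).mp ⟨i, hp⟩))) h'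

theorem pvFindOf_nonneg (p : List Char × Bool) (l : List Char)
    (h : 0 ≤ pvFindOf p l) :
    pvMatchesAt (l.drop (pvFindOf p l).toNat) p = true ∧
      ∀ i < (pvFindOf p l).toNat, pvMatchesAt (l.drop i) p = false := by
  rcases p with ⟨pat, ci⟩
  cases ci
  · have he : pvFindOf (pat, false) l = PySem.Chars.find l pat := by simp [pvFindOf]
    rw [he] at h ⊢
    obtain ⟨h1, h2⟩ := PySem.Chars.find_spec h
    constructor
    · rw [pvMatchesAt_drop]; simpa using h1
    · intro i hi
      rw [← Bool.not_eq_true, pvMatchesAt_drop]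
      simpa using h2 i hi
  · have he : pvFindOf (pat, true) l =
        PySem.Chars.find (PySem.Chars.upper l) (PySem.Chars.upper pat) := by simp [pvFindOf]
    rw [he] at h ⊢
    obtain ⟨h1, h2⟩ := PySem.Chars.find_spec h
    have hlen : (PySem.Chars.upper l).length = l.length := by simp [PySem.Chars.upper]
    constructor
    · rw [pvMatchesAt_drop]; simpa using h1
    · intro i hi
      rw [← Bool.not_eq_true, pvMatchesAt_drop]
      simp only [if_true]
      intro hp
      exact h2 i hi hp

-- pvFirstMatch spec: it returns the least position where some pattern matches, else none.
theorem pvFirstMatch_some (ps : List (List Char × Bool)) (l : List Char) (j : Nat)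
    (h : pvFirstMatch ps l = some j) :
    j ≤ l.length ∧ ps.any (pvMatchesAt (l.drop j)) = true ∧
      ∀ i < j, ps.any (pvMatchesAt (l.drop i)) = false := by
  induction l generalizing j with
  | nil =>
    unfold pvFirstMatch at h
    split at h
    · rename_i hyes
      cases h
      exact ⟨Nat.le_refl _, by simpa only [List.drop_nil] using hyes, by intro i hi; omega⟩
    · cases h
  | cons c rest ih =>
    unfold pvFirstMatch at h
    split at h
    · rename_i hyes
      cases h
      exact ⟨Nat.zero_le _, by simpa only [List.drop_zero] using hyes, by intro i hi; omega⟩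
    · rename_i hno
      rcases Option.map_eq_some_iff.mp h with ⟨j', hj', rfl⟩
      obtain ⟨h1, h2, h3⟩ := ih j' hj'
      refine ⟨by simpa using Nat.succ_le_succ h1, by simpa only [List.drop_succ_cons] using h2, ?_⟩
      intro i hi
      cases i with
      | zero => simpa only [List.drop_zero] using Bool.not_eq_true _ |>.mp hno
      | succ i' => simpa only [List.drop_succ_cons] using h3 i' (by omega)

theorem pvFirstMatch_none (ps : List (List Char × Bool)) (l : List Char)
    (h : pvFirstMatch ps l = none) :
    ∀ i, ps.any (pvMatchesAt (l.drop i)) = false := by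
  induction l with
  | nil =>
    unfold pvFirstMatch at h
    split at h
    · cases h
    · rename_i hno
      intro i
      simpa only [List.drop_nil] using Bool.not_eq_true _ |>.mp hno
  | cons c rest ih =>
    unfold pvFirstMatch at h
    split at h
    · cases h
    · rename_i hno
      intro i
      cases i with
      | zero => simpa only [List.drop_zero] using Bool.not_eq_true _ |>.mp hno
      | succ i' =>
        have hrec : pvFirstMatch ps rest = none := by
          cases hr : pvFirstMatch ps rest with
          | none => rfl
          | some k => rw [hr] at h; simp at h
        simpa only [List.drop_succ_cons] using ih hrec i'

-- For one pattern that occurs, the scan returns exactly Python's find position.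
theorem pvFirst_single (l : List Char) (p : List Char × Bool)
    (h : 0 ≤ pvFindOf p l) :
    pvFirstMatch [p] l = some (pvFindOf p l).toNat := by
  obtain ⟨hm, hlow⟩ := pvFindOf_nonneg p l h
  cases hcase : pvFirstMatch [p] l with
  | none =>
    have := pvFirstMatch_none [p] l hcase (pvFindOf p l).toNat
    simp only [List.any_cons, List.any_nil, Bool.or_false] at this
    rw [hm] at this; cases this
  | some j =>
    obtain ⟨hj1, hj2, hj3⟩ := pvFirstMatch_some [p] l j hcase
    simp only [List.any_cons, List.any_nil, Bool.or_false] at hj2 hj3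
    rcases lt_trichotomy j (pvFindOf p l).toNat with hlt | heq | hgt
    · rw [hlow j hlt] at hj2; cases hj2
    · rw [heq]
    · have := hj3 (pvFindOf p l).toNat hgt
      rw [hm] at this; cases this

-- Uniqueness: any Int with the "first any-match position (or length)" properties
-- equals B's cut point.
theorem pvCut_unique (ps : List (List Char × Bool)) (l : List Char) (E : Int)
    (h0 : 0 ≤ E) (_hle : E ≤ l.length)
    (hlow : ∀ i < E.toNat, ps.any (pvMatchesAt (l.drop i)) = false)
    (hhit : E = l.length ∨ ps.any (pvMatchesAt (l.drop E.toNat)) = true) :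
    E = ((pvFirstMatch ps l).getD l.length : Nat) := by
  cases hfm : pvFirstMatch ps l with
  | some j =>
    obtain ⟨hj1, hj2, hj3⟩ := pvFirstMatch_some ps l j hfm
    simp only [Option.getD_some]
    rcases lt_trichotomy E.toNat j with h | h | h
    · rcases hhit with heq | hm
      · omega
      · rw [hj3 E.toNat h] at hm; cases hm
    · omega
    · rw [hlow j h] at hj2; cases hj2
  | none =>
    have hall := pvFirstMatch_none ps l hfm
    simp only [Option.getD_none]
    rcases hhit with heq | hm
    · exact heq
    · rw [hall E.toNat] at hm; cases hm

-- The step of A's min-loop, at the list level.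
def pvStepMin (l : List Char) (acc : Int) (p : List Char × Bool) : Int :=
  if pvFindOf p l ≠ -1 then min acc (pvFindOf p l) else acc

-- Invariant of A's fold: the accumulator is the first any-match position among the
-- processed patterns, or the initial value.
theorem pvFoldMin_spec (l : List Char) (ps : List (List Char × Bool)) (acc : Int)
    (h0 : 0 ≤ acc) (hle : acc ≤ l.length) :
    0 ≤ ps.foldl (pvStepMin l) acc ∧ ps.foldl (pvStepMin l) acc ≤ l.length ∧
    ps.foldl (pvStepMin l) acc ≤ acc ∧
    (∀ i < (ps.foldl (pvStepMin l) acc).toNat, ps.any (pvMatchesAt (l.drop i)) = false) ∧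
    (ps.foldl (pvStepMin l) acc = acc ∨
      ps.any (pvMatchesAt (l.drop (ps.foldl (pvStepMin l) acc).toNat)) = true) := by
  induction ps generalizing acc with
  | nil => exact ⟨h0, hle, le_refl _, by intro i hi; simp, Or.inl rfl⟩
  | cons p rest ih =>
    simp only [List.foldl_cons]
    have hge := pvFindOf_ge p l
    have hlen := pvFindOf_le p l
    have h0' : 0 ≤ pvStepMin l acc p := by
      unfold pvStepMin; split
      · exact le_min h0 (by omega)
      · exact h0
    have hle' : pvStepMin l acc p ≤ l.length := by
      unfold pvStepMin; split
      · exact le_trans (min_le_left _ _) hle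
      · exact hle
    have hlea : pvStepMin l acc p ≤ acc := by
      unfold pvStepMin; split
      · exact min_le_left _ _
      · exact le_refl _
    obtain ⟨i0, i1, i2, i3, i4⟩ := ih (pvStepMin l acc p) h0' hle'
    refine ⟨i0, i1, le_trans i2 hlea, ?_, ?_⟩
    · -- no pattern of p :: rest matches below the result
      intro i hi
      have hrest := i3 i hi
      have hp : pvMatchesAt (l.drop i) p = false := by
        by_cases hneg : pvFindOf p l = -1
        · exact pvFindOf_neg_one p l hneg i
        · have hnn : 0 ≤ pvFindOf p l := by omega
          have hmin : pvStepMin l acc p ≤ pvFindOf p l := by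
            unfold pvStepMin; rw [if_pos hneg]; exact min_le_right _ _
          exact (pvFindOf_nonneg p l hnn).2 i (by omega)
      simp [hp, hrest]
    · -- the result is acc or a match position
      rcases i4 with heq | hm
      · rw [heq]
        unfold pvStepMin
        split
        · rename_i hneg
          have hnn : 0 ≤ pvFindOf p l := by omega
          by_cases hc : acc ≤ pvFindOf p l
          · left; exact min_eq_left hc
          · right
            rw [min_eq_right (by omega)]
            simp [(pvFindOf_nonneg p l hnn).1]
        · left; rfl
      · right; simp [hm]

-- upper "summary:" is "SUMMARY:".
theorem pvUpperSummary : PySem.Chars.upper "summary:".toList = "SUMMARY:".toList := by decide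

-- Stage 1: A's SUMMARY:-prefix stripping equals B's, at the list level.
theorem pvPrefix_eq (s : String) :
    (if PySem.Str.isIn "SUMMARY:" (PySem.Str.upper s) then
        PySem.Str.slice s (some (PySem.Str.find (PySem.Str.upper s) "SUMMARY:" + 8)) none
      else s).toList =
    (match pvFirstMatch pvSummaryPat s.toList with
      | some j => s.toList.drop (j + 8)
      | none => s.toList) := by
  have hfind : PySem.Str.find (PySem.Str.upper s) "SUMMARY:" =
      pvFindOf ("summary:".toList, true) s.toList := by
    rw [PySem.Str.find_eq, PySem.Str.toList_upper]
    show _ = (if true then _ else _)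
    rw [if_pos rfl, pvUpperSummary]
  by_cases hin : PySem.Str.isIn "SUMMARY:" (PySem.Str.upper s) = true
  · rw [if_pos hin]
    have hinf : ("SUMMARY:".toList : List Char) <:+: (PySem.Chars.upper s.toList) := by
      rw [PySem.Str.isIn_eq, PySem.Str.toList_upper] at hin
      exact (PySem.Chars.isIn_iff_infix _ _).mp hin
    have hnn : 0 ≤ pvFindOf ("summary:".toList, true) s.toList := by
      show 0 ≤ (if true then _ else _)
      rw [if_pos rfl, pvUpperSummary]
      exact (PySem.Chars.find_nonneg_iff _ _).mpr hinf
    rw [show pvFirstMatch pvSummaryPat s.toList =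
        some (pvFindOf ("summary:".toList, true) s.toList).toNat from
      pvFirst_single s.toList _ hnn]
    rw [hfind, PySem.Str.toList_slice]
    show PySem.List.slice s.toList (some (pvFindOf ("summary:".toList, true) s.toList + 8)) none = _
    rw [PySem.List.slice_from s.toList (by omega : (0:Int) ≤ pvFindOf ("summary:".toList, true) s.toList + 8)]
    congr 1
    omega
  · rw [if_neg hin]
    cases hcase : pvFirstMatch pvSummaryPat s.toList with
    | none => rfl
    | some j =>
      exfalso
      obtain ⟨hj1, hj2, hj3⟩ := pvFirstMatch_some _ _ _ hcase
      simp only [pvSummaryPat, List.any_cons, List.any_nil, Bool.or_false] at hj2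
      rw [pvMatchesAt_drop] at hj2
      simp only [if_true] at hj2
      rw [pvUpperSummary] at hj2
      apply hin
      rw [PySem.Str.isIn_eq, PySem.Str.toList_upper]
      apply (PySem.Chars.exists_prefix_drop_iff_isIn _ _).mp
      exact ⟨j, hj2⟩

-- Stage 2: A's min-loop over the concrete marker list, rewritten to pvStepMin.
theorem pvFold_eq (f : String) :
    pyMarkers.foldl
      (fun end_idx marker =>
        let idx := if marker ≠ "```tool_code"
          then PySem.Str.find (PySem.Str.upper f) (PySem.Str.upper marker)
          else PySem.Str.find f marker
        if idx ≠ -1 then min end_idx idx else end_idx)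
      (PySem.Str.len f)
    = pvCutPat.foldl (pvStepMin f.toList) (f.toList.length : Int) := by
  have key : ∀ (m : String) (ci : Bool), (ci = true → m ≠ "```tool_code") →
      (ci = false → m = "```tool_code") →
      (if m ≠ "```tool_code"
        then PySem.Str.find (PySem.Str.upper f) (PySem.Str.upper m)
        else PySem.Str.find f m) = pvFindOf (m.toList, ci) f.toList := by
    intro m ci h1 h2
    cases ci
    · rw [if_neg (by simp [h2 rfl]), PySem.Str.find_eq]
      show _ = (if false then _ else _)
      rw [if_neg (by simp)]
    · rw [if_pos (h1 rfl), PySem.Str.find_eq, PySem.Str.toList_upper, PySem.Str.toList_upper]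
      show _ = (if true then _ else _)
      rw [if_pos rfl]
  simp only [pyMarkers, pvCutPat, List.foldl_cons, List.foldl_nil]
  rw [PySem.Str.len_eq]
  rw [key "[END_SUMMARY]" true (fun _ => by decide) (by simp),
      key "PLAN:" true (fun _ => by decide) (by simp),
      key "NEXT AGENT:" true (fun _ => by decide) (by simp),
      key "DELEGATION:" true (fun _ => by decide) (by simp),
      key "```tool_code" false (by simp) (fun _ => rfl)]
  unfold pvStepMin
  rfl

-- ===== VERDICT (by name: the statement is the Claim_ definition above) =====
set_option maxHeartbeats 1000000 in
theorem filter_agent_content_spec : Claim_equal_filter_agent_content := by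
  intro content _
  unfold Spec_filter_agent_content filter_agent_content filter_agent_content_alt
  apply String.toList_inj.mp
  have hlist :
      (if PySem.Str.isIn "SUMMARY:" (PySem.Str.upper content) then
          PySem.Str.slice content
            (some (PySem.Str.find (PySem.Str.upper content) "SUMMARY:" + 8)) none
        else content).toList =
      (match pvFirstMatch pvSummaryPat content.toList with
        | some j => content.toList.drop (j + 8)
        | none => content.toList) := pvPrefix_eq content
  set fA : String :=
    (if PySem.Str.isIn "SUMMARY:" (PySem.Str.upper content) then
        PySem.Str.slice content
          (some (PySem.Str.find (PySem.Str.upper content) "SUMMARY:" + 8)) none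
      else content) with hfA
  set fB : List Char :=
    (match pvFirstMatch pvSummaryPat content.toList with
      | some j => content.toList.drop (j + 8)
      | none => content.toList) with hfB
  have hfold := pvFold_eq fA
  rw [hlist] at hfold
  obtain ⟨e0, e1, _, e3, e4⟩ := pvFoldMin_spec fB pvCutPat (fB.length : Int)
    (Int.natCast_nonneg _) (le_refl _)
  have hEeq : pvCutPat.foldl (pvStepMin fB) (fB.length : Int) =
      ((pvFirstMatch pvCutPat fB).getD fB.length : Nat) := by
    apply pvCut_unique pvCutPat fB _ e0 e1 e3
    rcases e4 with h | h
    · left; exact_mod_cast h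
    · right; exact h
  rw [PySem.Str.toList_strip, String.toList_ofList, PySem.Str.toList_slice, hlist]
  show PySem.Chars.strip (PySem.List.slice fB none (some _)) = _
  rw [hfold, PySem.List.slice_to fB e0]
  congr 2
  rw [hEeq]
  simp only [Int.toNat_natCast]
  rw [← hfB]
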